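-- pv_equiv track=rewrite | github.com/dina-lab3D/CombFold | paper_resources/analysis_scripts/build_crosslinks_benchmark.py | create_ident_chain_map
-- ===== SOURCE A (Python) =====
-- from collections import defaultdict
-- from typing import Dict, Tuple, List
--
-- def create_ident_chain_map(chain_to_seq: Dict[str, str]) -> Dict[str, str]:
--     seq_to_chains = defaultdict(list)
--     for chain_name, seq in chain_to_seq.items():
--         seq_to_chains[seq].append(chain_name)
--
--     ident_chain_map = {}
--     for v in seq_to_chains.values():
--         ident_name = sorted(v)[0]
--         for chain_name in v:
--             ident_chain_map[chain_name] = ident_name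
--
--     return ident_chain_map
-- ===== SOURCE B (Python) =====
-- def create_ident_chain_map(chain_to_seq):
--     out = {}
--     for seq in dict.fromkeys(chain_to_seq.values()):
--         ident = min(n for n, q in chain_to_seq.items() if q == seq)
--         for n, q in chain_to_seq.items():
--             if q == seq:
--                 out[n] = ident
--     return out
-- ===== Notes on version B (the rewrite author's own statement) =====
-- stated objective: simpler
-- what changed: B drops the defaultdict grouping and per-group sorts: it iterates the distinct sequences in first-occurrence order and, per sequence, scans the items once with min() to get the representative and once to assign it.
import Mathlib
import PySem

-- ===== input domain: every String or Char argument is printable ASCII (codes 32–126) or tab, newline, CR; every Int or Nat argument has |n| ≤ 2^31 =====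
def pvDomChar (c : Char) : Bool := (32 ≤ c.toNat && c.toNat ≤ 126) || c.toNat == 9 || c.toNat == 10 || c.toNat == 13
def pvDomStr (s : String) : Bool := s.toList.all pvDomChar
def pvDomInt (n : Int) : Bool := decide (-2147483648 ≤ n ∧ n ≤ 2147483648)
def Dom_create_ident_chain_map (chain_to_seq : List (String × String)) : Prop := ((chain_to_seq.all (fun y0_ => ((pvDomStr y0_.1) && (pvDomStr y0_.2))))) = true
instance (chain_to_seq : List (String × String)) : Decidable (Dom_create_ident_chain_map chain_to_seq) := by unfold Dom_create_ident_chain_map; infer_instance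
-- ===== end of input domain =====

-- B replaces the defaultdict-grouping + per-group sorts by a scan per distinct sequence using min(); objective: simpler.

-- ===== PORT A =====
def create_ident_chain_map (chain_to_seq : List (String × String)) : List (String × String) :=
  let seq_to_chains : PySem.Dict String (List String) :=
    chain_to_seq.foldl (fun d p => d.modify p.2 [] (· ++ [p.1])) PySem.Dict.empty
  let ident_chain_map : PySem.Dict String String :=
    seq_to_chains.values.foldl (fun acc v =>
      -- sorted(v)[0]: v is a group built by appending, never empty, so the IndexError branch is unreachable
      let ident_name := ((PySem.List.pyGet? (PySem.List.sorted v (fun x => x) false) 0)).getD ""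
      v.foldl (fun a chain_name => a.insert chain_name ident_name) acc) PySem.Dict.empty
  ident_chain_map.items

-- ===== PORT B =====
def create_ident_chain_map_alt (chain_to_seq : List (String × String)) : List (String × String) :=
  let out : PySem.Dict String String :=
    (PySem.List.dedup (chain_to_seq.map (·.2))).foldl (fun acc seq =>
      -- min(...): the generator is nonempty because seq comes from the values, so ValueError is unreachable
      let ident := (PySem.List.min? ((chain_to_seq.filter (fun p => p.2 == seq)).map (·.1)) (fun x => x)).getD ""
      chain_to_seq.foldl (fun a p => if p.2 == seq then a.insert p.1 ident else a) acc) PySem.Dict.empty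
  out.items

-- ===== PRECONDITION & SPEC =====
def Spec_create_ident_chain_map (chain_to_seq : List (String × String)) (out : List (String × String)) : Prop := out = create_ident_chain_map_alt chain_to_seq
instance (chain_to_seq : List (String × String)) (out : List (String × String)) : Decidable (Spec_create_ident_chain_map chain_to_seq out) := by unfold Spec_create_ident_chain_map; infer_instance

-- ===== CLAIM (what is proved, stated in full; the proofs are below) =====
def Claim_equal_create_ident_chain_map : Prop := ∀ (chain_to_seq : List (String × String)), Dom_create_ident_chain_map chain_to_seq → Spec_create_ident_chain_map chain_to_seq (create_ident_chain_map chain_to_seq)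

-- ===== LEMMAS AND PROOFS =====

-- head of Python's stable sort = Python's min (first extremal), for a nonempty String list
theorem pv_sorted_head_eq_min (v : List String) (hv : v ≠ []) :
    ((PySem.List.pyGet? (PySem.List.sorted v (fun x => x) false) 0)).getD ""
      = (PySem.List.min? v (fun x => x)).getD "" := by
  obtain ⟨m, t, hs⟩ : ∃ m t, PySem.List.sorted v (fun x => x) false = m :: t := by
    cases hsv : PySem.List.sorted v (fun x => x) false with
    | nil => exact absurd ((PySem.List.sorted_eq_nil_iff v (fun x => x) false).mp hsv) hv
    | cons m t => exact ⟨m, t, rfl⟩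
  obtain ⟨m', hm'⟩ : ∃ m', PySem.List.min? v (fun x => x) = some m' := by
    cases hmv : PySem.List.min? v (fun x => x) with
    | none => exact absurd ((PySem.List.min?_eq_none_iff v (fun x => x)).mp hmv) hv
    | some m' => exact ⟨m', rfl⟩
  have hmem : m ∈ v := (PySem.List.mem_sorted v (fun x => x) false m).mp (hs ▸ List.mem_cons_self)
  have h1 : m ≤ m' := PySem.List.key_head_sorted_le (xs := v) (key := fun x => x) hs m' (PySem.List.min?_mem hm')
  have h2 : m' ≤ m := PySem.List.min?_isMin hm' m hmem
  rw [hs, hm', PySem.List.pyGet?_zero_cons]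
  exact le_antisymm h1 h2

-- the grouping fold: items = distinct seqs paired with their (filtered) name groups
theorem pv_group_items (l : List (String × String)) :
    (l.foldl (fun d p => d.modify p.2 [] (· ++ [p.1])) (PySem.Dict.empty : PySem.Dict String (List String))).items
      = (PySem.List.dedup (l.map (·.2))).map
          (fun s => (s, (l.filter (fun p => p.2 == s)).map (·.1))) := by
  have hfold : l.foldl (fun d p => d.modify p.2 [] (· ++ [p.1])) (PySem.Dict.empty : PySem.Dict String (List String))
      = (l.map Prod.swap).foldl (fun d q => d.modify q.1 [] (· ++ [q.2])) PySem.Dict.empty := by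
    rw [List.foldl_map]
    rfl
  have hnd : ((l.map Prod.swap).foldl (fun d q => d.modify q.1 [] (· ++ [q.2])) (PySem.Dict.empty : PySem.Dict String (List String))).keys.Nodup :=
    PySem.Dict.nodup_keys_foldl_modify_key (l.map Prod.swap) (fun q => q.1) []
      (fun _ (q : String × String) => (fun (w : List String) => w ++ [q.2])) PySem.Dict.empty
      (by simp)
  rw [hfold, PySem.Dict.items_eq_map_keys _ hnd ([] : List String)]
  have hkeys : ((l.map Prod.swap).foldl (fun d q => d.modify q.1 [] (· ++ [q.2])) (PySem.Dict.empty : PySem.Dict String (List String))).keys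
      = PySem.List.dedup (l.map (·.2)) := by
    rw [PySem.Dict.keys_foldl_modify_key]
    simp [PySem.Dict.keys_empty, List.map_map, PySem.List.dedup_eq_ofList, Function.comp_def]
    rfl
  rw [hkeys]
  apply List.map_congr_left
  intro s _
  rw [PySem.Dict.getD_foldl_modify_append, PySem.Dict.getD_empty]
  simp [List.filter_map, List.map_map, Function.comp_def, Prod.swap]

theorem create_ident_chain_map_spec : Claim_equal_create_ident_chain_map := by
  intro l _
  unfold Spec_create_ident_chain_map
  simp only [create_ident_chain_map, create_ident_chain_map_alt]
  congr 1
  simp only [PySem.Dict.values, pv_group_items, List.map_map, Function.comp_def]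
  rw [List.foldl_map]
  apply PySem.List.foldl_congr_mem
  intro acc s hs
  have hne : (l.filter (fun p => p.2 == s)).map (·.1) ≠ [] := by
    obtain ⟨p, hp, hps⟩ := List.mem_map.mp ((PySem.List.mem_dedup _ s).mp hs)
    have hpf : p ∈ l.filter (fun p => p.2 == s) := List.mem_filter.mpr ⟨hp, by simp [hps]⟩
    exact List.ne_nil_of_mem (List.mem_map_of_mem hpf)
  rw [pv_sorted_head_eq_min _ hne, PySem.List.foldl_if_eq_foldl_filter, List.foldl_map]

-- ===== VERDICT (by name: the statement is the Claim_ definition above) =====
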